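-- pv_equiv track=rewrite | github.com/ahariri13/Protein-Diffusion | SimpleSeq/Aditya/chebnet_with_diffusion.py | renumber_atoms_and_residues
-- ===== SOURCE A (Python) =====
-- def renumber_atoms_and_residues(atoms_in_order):
--     new_dict = {}
--     res_mapping = {}
--     next_new_res_id = 0
--     next_new_atom_index = 0
--     for (orig_res_id, orig_atom_index, category) in atoms_in_order:
--         if orig_res_id not in res_mapping:
--             res_mapping[orig_res_id] = next_new_res_id
--             new_dict[next_new_res_id] = {"backbone": [], "sidechain": []}
--             next_new_res_id += 1
--         new_res_id = res_mapping[orig_res_id]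
--         new_dict[new_res_id][category].append(next_new_atom_index)
--         next_new_atom_index += 1
--     return new_dict
-- ===== SOURCE B (Python) =====
-- def renumber_atoms_and_residues(atoms_in_order):
--     # transpose first: partition atom positions into per-category columns
--     cols = {"backbone": [], "sidechain": []}
--     for j, (r, _, c) in enumerate(atoms_in_order):
--         cols[c].append((r, j))
--     residues = list(dict.fromkeys(t[0] for t in atoms_in_order))
--     return {i: {cat: [j for r, j in cols[cat] if r == rid] for cat in cols}
--             for i, rid in enumerate(residues)}
-- ===== Notes on version B (the rewrite author's own statement) =====
-- stated objective: alternative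
-- what changed: B transposes the problem: it first partitions atom positions into per-category columns (one dict keyed by category, not by residue), then builds the result declaratively by dedup-ing residue ids and filtering each category column per residue; A instead keeps per-residue buckets and a residue renumbering map with running counters in a single stateful pass.
import Mathlib
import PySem

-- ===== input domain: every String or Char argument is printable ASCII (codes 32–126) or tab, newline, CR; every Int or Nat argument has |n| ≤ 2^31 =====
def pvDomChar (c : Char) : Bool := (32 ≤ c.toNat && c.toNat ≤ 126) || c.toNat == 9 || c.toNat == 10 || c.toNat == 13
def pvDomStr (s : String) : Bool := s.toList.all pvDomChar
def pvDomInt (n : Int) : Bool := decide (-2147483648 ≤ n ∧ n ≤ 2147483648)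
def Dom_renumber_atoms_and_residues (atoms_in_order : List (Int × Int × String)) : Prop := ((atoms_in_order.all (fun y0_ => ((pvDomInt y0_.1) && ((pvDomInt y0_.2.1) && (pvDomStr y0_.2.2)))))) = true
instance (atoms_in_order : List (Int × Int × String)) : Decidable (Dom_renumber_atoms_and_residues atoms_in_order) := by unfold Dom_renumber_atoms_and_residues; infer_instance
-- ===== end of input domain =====

-- B replaces A's single stateful distribution pass (per-residue buckets, renumbering map, counters)
-- by a transpose-first alternative: partition positions into per-category columns, then build the
-- result by dedup-ing residue ids and filtering each column per residue.


-- ===== PORT A =====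
-- the body of A's for-loop, one step of the fold (state: new_dict, res_mapping, next_new_res_id, next_new_atom_index)
def pvStepA (st : PySem.Dict Int (PySem.Dict String (List Int)) × PySem.Dict Int Int × Int × Int)
    (t : Int × Int × String) :
    PySem.Dict Int (PySem.Dict String (List Int)) × PySem.Dict Int Int × Int × Int :=
  let (new_dict, res_mapping, next_new_res_id, next_new_atom_index) := st
  let (orig_res_id, _orig_atom_index, category) := t
  let (new_dict, res_mapping, next_new_res_id) :=
    if res_mapping.contains orig_res_id then (new_dict, res_mapping, next_new_res_id)
    else (new_dict.insert next_new_res_id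
            (PySem.Dict.ofList [("backbone", ([] : List Int)), ("sidechain", [])]),
          res_mapping.insert orig_res_id next_new_res_id,
          next_new_res_id + 1)
  let new_res_id := res_mapping.getD orig_res_id 0
  let new_dict := new_dict.modify new_res_id PySem.Dict.empty
    (fun inner => inner.modify category [] (fun l => l ++ [next_new_atom_index]))
  (new_dict, res_mapping, next_new_res_id, next_new_atom_index + 1)

def renumber_atoms_and_residues (atoms_in_order : List (Int × Int × String)) :
    List (Int × List (String × List Int)) :=
  let st := atoms_in_order.foldl pvStepA (PySem.Dict.empty, PySem.Dict.empty, 0, 0)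
  st.1.items.map (fun p => (p.1, p.2.items))

-- ===== PORT B =====
def renumber_atoms_and_residues_alt (atoms_in_order : List (Int × Int × String)) :
    List (Int × List (String × List Int)) :=
  -- cols = {"backbone": [], "sidechain": []}; for j,(r,_,c) in enumerate: cols[c].append((r, j))
  -- (cols[c] raises KeyError on an unknown category; on such inputs — outside Pre_ — the port's
  --  modify inserts instead, which is fine since nothing is claimed there)
  let cols : PySem.Dict String (List (Int × Int)) :=
    (PySem.List.enumerate atoms_in_order).foldl
      (fun d p => d.modify p.2.2.2 [] (fun l => l ++ [(p.2.1, p.1)]))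
      (PySem.Dict.ofList [("backbone", []), ("sidechain", [])])
  -- residues = list(dict.fromkeys(t[0] for t in atoms_in_order))
  let residues := PySem.List.dedup (atoms_in_order.map (fun t => t.1))
  -- {i: {cat: [j for r, j in cols[cat] if r == rid] for cat in cols} for i, rid in enumerate(residues)}
  let d : PySem.Dict Int (PySem.Dict String (List Int)) :=
    PySem.Dict.ofList ((PySem.List.enumerate residues).map (fun p =>
      (p.1, PySem.Dict.ofList (cols.keys.map (fun cat =>
        (cat, ((cols.getD cat []).filter (fun q => q.1 == p.2)).map (fun q => q.2)))))))
  d.items.map (fun p => (p.1, p.2.items))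

-- ===== PRECONDITION & SPEC =====
-- Pre_ excludes exactly the inputs on which A raises KeyError: an atom whose category is
-- neither "backbone" nor "sidechain".
def Pre_renumber_atoms_and_residues (atoms_in_order : List (Int × Int × String)) : Prop :=
  ∀ t ∈ atoms_in_order, t.2.2 = "backbone" ∨ t.2.2 = "sidechain"
instance (atoms_in_order : List (Int × Int × String)) : Decidable (Pre_renumber_atoms_and_residues atoms_in_order) := by unfold Pre_renumber_atoms_and_residues; infer_instance

def pvWitness_renumber_atoms_and_residues : (List (Int × Int × String)) :=
  [(5, 10, "backbone"), (5, 11, "sidechain"), (3, 2, "backbone")]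

def Spec_renumber_atoms_and_residues (atoms_in_order : List (Int × Int × String)) (out : List (Int × List (String × List Int))) : Prop := out = renumber_atoms_and_residues_alt atoms_in_order
instance (atoms_in_order : List (Int × Int × String)) (out : List (Int × List (String × List Int))) : Decidable (Spec_renumber_atoms_and_residues atoms_in_order out) := by unfold Spec_renumber_atoms_and_residues; infer_instance

-- ===== CLAIM (what is proved, stated in full; the proofs are below) =====
def Claim_equal_renumber_atoms_and_residues : Prop := ∀ (atoms_in_order : List (Int × Int × String)), Dom_renumber_atoms_and_residues atoms_in_order → Pre_renumber_atoms_and_residues atoms_in_order → Spec_renumber_atoms_and_residues atoms_in_order (renumber_atoms_and_residues atoms_in_order)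

-- ===== LEMMAS AND PROOFS =====

-- the atom indices of residue rid in category cat (B computes exactly these by filtering)
def pvCatIdx (atoms_in_order : List (Int × Int × String)) (rid : Int) (cat : String) : List Int :=
  ((PySem.List.enumerate atoms_in_order).filter
      (fun p => p.2.1 == rid && p.2.2.2 == cat)).map (fun p => p.1)

-- the inner per-residue dict both programs build
def pvInner (atoms : List (Int × Int × String)) (r : Int) : PySem.Dict String (List Int) :=
  PySem.Dict.mk [("backbone", pvCatIdx atoms r "backbone"),
                 ("sidechain", pvCatIdx atoms r "sidechain")]

-- A's loop state after processing the whole prefix xs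
def pvState (xs : List (Int × Int × String)) :
    PySem.Dict Int (PySem.Dict String (List Int)) × PySem.Dict Int Int × Int × Int :=
  let u := PySem.List.dedup (xs.map (fun t => t.1))
  (PySem.Dict.mk ((PySem.List.enumerate u).map (fun p => (p.1, pvInner xs p.2))),
   PySem.Dict.mk ((PySem.List.enumerate u).map (fun p => (p.2, p.1))),
   (u.length : Int),
   (xs.length : Int))

theorem pv_enum_concat {α : Type} (l : List α) (x : α) :
    ∀ s : Int, PySem.List.enumerate (l ++ [x]) s
      = PySem.List.enumerate l s ++ [((s + l.length : Int), x)] := by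
  induction l with
  | nil => intro s; simp [PySem.List.enumerate]
  | cons a t ih =>
      intro s
      have hk : (s + 1 + (t.length : Int)) = s + ((t.length + 1 : Nat) : Int) := by
        push_cast; ring
      simp only [List.cons_append, PySem.List.enumerate, ih (s + 1), List.length_cons, hk]

theorem pv_enum_map_snd {α : Type} (l : List α) :
    ∀ s : Int, (PySem.List.enumerate l s).map (fun p => p.2) = l := by
  induction l with
  | nil => intro s; simp [PySem.List.enumerate]
  | cons a t ih => intro s; simp [PySem.List.enumerate, ih]

theorem pv_mem_snd_of_mem_enum {α : Type} {l : List α} {s : Int} {q : Int × α}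
    (h : q ∈ PySem.List.enumerate l s) : q.2 ∈ l := by
  have := List.mem_map_of_mem (f := fun p : Int × α => p.2) h
  rwa [pv_enum_map_snd] at this

theorem pv_enum_key_lb {α : Type} (l : List α) :
    ∀ s : Int, ∀ q ∈ PySem.List.enumerate l s, s ≤ q.1 := by
  induction l with
  | nil => intro s q h; simp [PySem.List.enumerate] at h
  | cons a t ih =>
      intro s q h
      simp only [PySem.List.enumerate, List.mem_cons] at h
      rcases h with rfl | h
      · simp
      · have := ih (s + 1) q h; omega

theorem pv_enum_key_ub {α : Type} (l : List α) :
    ∀ s : Int, ∀ q ∈ PySem.List.enumerate l s, q.1 < s + (l.length : Int) := by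
  induction l with
  | nil => intro s q h; simp [PySem.List.enumerate] at h
  | cons a t ih =>
      intro s q h
      simp only [PySem.List.enumerate, List.mem_cons] at h
      rcases h with rfl | h
      · simp only [List.length_cons]; push_cast; omega
      · have := ih (s + 1) q h
        simp only [List.length_cons]
        push_cast at this ⊢
        omega

theorem pv_contains_mapping (u : List Int) (r : Int) :
    ∀ s : Int,
      (PySem.Dict.mk ((PySem.List.enumerate u s).map (fun p => (p.2, p.1)))).contains r
        = decide (r ∈ u) := by
  induction u with
  | nil => intro s; simp [PySem.List.enumerate, PySem.Dict.contains]
  | cons a t ih =>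
      intro s
      have := ih (s + 1)
      simp only [PySem.List.enumerate, List.map_cons, PySem.Dict.contains, List.any_cons] at *
      by_cases h : a = r <;> simp [h, Ne.symm, this]

theorem pv_getD_mapping (u : List Int) (r : Int) (hr : r ∈ u) (hn : u.Nodup) :
    ∀ s : Int,
      (PySem.Dict.mk ((PySem.List.enumerate u s).map (fun p => (p.2, p.1)))).getD r 0
        = s + (u.idxOf r : Int) := by
  induction u with
  | nil => simp at hr
  | cons a t ih =>
      intro s
      simp only [PySem.List.enumerate, List.map_cons]
      by_cases h : a = r
      · subst h
        simp [PySem.Dict.getD, PySem.Dict.get?]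
      · have hrt : r ∈ t := by
          rcases List.mem_cons.mp hr with hmem | hmem
          · exact absurd hmem.symm h
          · exact hmem
        have hnt : t.Nodup := hn.of_cons
        have := ih hrt hnt (s + 1)
        simp only [PySem.Dict.getD, PySem.Dict.get?] at this ⊢
        rw [List.find?_cons_of_neg]
        · rw [this, List.idxOf_cons_ne _ (by exact h)]
          push_cast; ring
        · simp [h]

theorem pv_idxOf_append (u : List Int) (r : Int) (h : r ∉ u) :
    (u ++ [r]).idxOf r = u.length := by
  induction u with
  | nil => simp
  | cons a t ih =>
      have ha : a ≠ r := fun e => h (e ▸ List.mem_cons_self)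
      rw [List.cons_append, List.idxOf_cons_ne _ ha,
        ih (fun m => h (List.mem_cons_of_mem _ m))]
      rfl

theorem pv_contains_key {ν : Type} (u : List Int) (r : Int) (g : Int → ν) (hr : r ∈ u) :
    ∀ s : Int,
      (((PySem.List.enumerate u s).map (fun p => (p.1, g p.2))).any
        (fun q => q.1 == s + (u.idxOf r : Int))) = true := by
  induction u with
  | nil => simp at hr
  | cons a t ih =>
      intro s
      by_cases h : a = r
      · subst h; simp [PySem.List.enumerate, List.idxOf_cons_self]
      · have hrt : r ∈ t := (List.mem_cons.mp hr).resolve_left (fun e => h e.symm)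
        have hidx : s + (((a :: t).idxOf r : Nat) : Int) = (s + 1) + ((t.idxOf r : Nat) : Int) := by
          rw [List.idxOf_cons_ne _ h]; push_cast; ring
        simp only [PySem.List.enumerate, List.map_cons, List.any_cons]
        rw [hidx, ih hrt (s + 1)]
        simp

theorem pv_getD_enum {ν : Type} (u : List Int) (r : Int) (g : Int → ν) (dflt : ν)
    (hr : r ∈ u) (hn : u.Nodup) :
    ∀ s : Int,
      (PySem.Dict.mk ((PySem.List.enumerate u s).map (fun p => (p.1, g p.2)))).getD
          (s + (u.idxOf r : Int)) dflt = g r := by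
  induction u with
  | nil => simp at hr
  | cons a t ih =>
      intro s
      by_cases h : a = r
      · subst h
        simp [PySem.List.enumerate, PySem.Dict.getD, PySem.Dict.get?, List.idxOf_cons_self]
      · have hrt : r ∈ t := (List.mem_cons.mp hr).resolve_left (fun e => h e.symm)
        have hnt : t.Nodup := hn.of_cons
        have hidx : s + (((a :: t).idxOf r : Nat) : Int) = (s + 1) + ((t.idxOf r : Nat) : Int) := by
          rw [List.idxOf_cons_ne _ h]; push_cast; ring
        have hne : ¬ ((fun p : Int × ν => p.1 == s + (((a :: t).idxOf r : Nat) : Int)) (s, g a)) = true := by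
          simp only [beq_iff_eq]
          rw [List.idxOf_cons_ne _ h]
          push_cast
          omega
        have := ih hrt hnt (s + 1)
        simp only [PySem.Dict.getD, PySem.Dict.get?] at this ⊢
        simp only [PySem.List.enumerate, List.map_cons]
        rw [List.find?_cons_of_neg (p := fun p : Int × ν => p.1 == s + (((a :: t).idxOf r : Nat) : Int)) (a := (s, g a)) hne, hidx]
        exact this

theorem pv_enum_key_elem (u : List Int) (r : Int) (hr : r ∈ u) (hn : u.Nodup) :
    ∀ s : Int, ∀ p ∈ PySem.List.enumerate u s,
      (p.1 = s + (u.idxOf r : Int) ↔ p.2 = r) := by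
  induction u with
  | nil => simp at hr
  | cons a t ih =>
      intro s p hp
      simp only [PySem.List.enumerate, List.mem_cons] at hp
      by_cases h : a = r
      · subst h
        have hat : a ∉ t := (List.nodup_cons.mp hn).1
        rcases hp with rfl | hp
        · simp [List.idxOf_cons_self]
        · have hlb := pv_enum_key_lb t (s + 1) p hp
          have hmem := pv_mem_snd_of_mem_enum hp
          constructor
          · intro he; rw [List.idxOf_cons_self] at he; push_cast at he; omega
          · intro he; exact absurd (he ▸ hmem) hat
      · have hrt : r ∈ t := (List.mem_cons.mp hr).resolve_left (fun e => h e.symm)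
        have hnt : t.Nodup := hn.of_cons
        have hidx : s + (((a :: t).idxOf r : Nat) : Int) = (s + 1) + ((t.idxOf r : Nat) : Int) := by
          rw [List.idxOf_cons_ne _ h]; push_cast; ring
        rcases hp with rfl | hp
        · constructor
          · intro he
            rw [List.idxOf_cons_ne _ h] at he; push_cast at he; omega
          · intro he; exact absurd (by simpa using he) h
        · rw [hidx]; exact ih hrt hnt (s + 1) p hp

theorem pv_insert_enum {ν : Type} (u : List Int) (r : Int) (g : Int → ν) (v : ν)
    (hr : r ∈ u) (hn : u.Nodup) :
    ∀ s : Int,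
      (PySem.Dict.mk ((PySem.List.enumerate u s).map (fun p => (p.1, g p.2)))).insert
          (s + (u.idxOf r : Int)) v
        = PySem.Dict.mk ((PySem.List.enumerate u s).map
            (fun p => (p.1, if p.2 = r then v else g p.2))) := by
  intro s
  simp only [PySem.Dict.insert, PySem.Dict.contains]
  rw [pv_contains_key u r g hr s, if_pos rfl]
  congr 1
  rw [List.map_map]
  apply List.map_congr_left
  intro p hp
  have hiff := pv_enum_key_elem u r hr hn s p hp
  by_cases hpr : p.2 = r
  · have hk : p.1 = s + (u.idxOf r : Int) := hiff.mpr hpr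
    simp [Function.comp, hk, hpr]
  · have hk : ¬ p.1 = s + (u.idxOf r : Int) := fun e => hpr (hiff.mp e)
    simp [Function.comp, hk, hpr]

-- modify at the key of residue r rewrites exactly r's inner dict
theorem pv_modify_enum (u : List Int) (r : Int) (hr : r ∈ u) (hn : u.Nodup)
    (g : Int → PySem.Dict String (List Int)) (f : PySem.Dict String (List Int) → PySem.Dict String (List Int)) :
    ∀ s : Int,
      (PySem.Dict.mk ((PySem.List.enumerate u s).map (fun p => (p.1, g p.2)))).modify
          (s + (u.idxOf r : Int)) PySem.Dict.empty f
        = PySem.Dict.mk ((PySem.List.enumerate u s).map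
            (fun p => (p.1, if p.2 = r then f (g r) else g p.2))) := by
  intro s
  simp only [PySem.Dict.modify]
  rw [pv_getD_enum u r g PySem.Dict.empty hr hn s, pv_insert_enum u r g (f (g r)) hr hn s]

theorem pv_catIdx_concat (xs : List (Int × Int × String)) (x : Int × Int × String)
    (r' : Int) (cat : String) :
    pvCatIdx (xs ++ [x]) r' cat
      = pvCatIdx xs r' cat ++ (if x.1 = r' ∧ x.2.2 = cat then [(xs.length : Int)] else []) := by
  simp only [pvCatIdx, pv_enum_concat xs x 0, List.filter_append, List.map_append]
  congr 1
  by_cases h1 : x.1 = r' <;> by_cases h2 : x.2.2 = cat <;>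
    simp [h1, h2]

theorem pv_catIdx_fresh (xs : List (Int × Int × String)) (r : Int)
    (h : r ∉ xs.map (fun t => t.1)) (cat : String) : pvCatIdx xs r cat = [] := by
  simp only [pvCatIdx, List.map_eq_nil_iff, List.filter_eq_nil_iff]
  intro p hp
  have h2 : p.2 ∈ xs := pv_mem_snd_of_mem_enum hp
  have : p.2.1 ∈ xs.map (fun t => t.1) := List.mem_map_of_mem h2
  simp only [Bool.and_eq_true, beq_iff_eq, not_and]
  intro he; exact absurd (he ▸ this) h

-- appending atom (r, a, c) updates exactly residue r's inner dict
theorem pv_inner_update (xs : List (Int × Int × String)) (r a : Int) (c : String)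
    (hc : c = "backbone" ∨ c = "sidechain") (q : Int) :
    (if q = r then (pvInner xs r).modify c [] (fun l => l ++ [(xs.length : Int)])
     else pvInner xs q)
      = pvInner (xs ++ [(r, a, c)]) q := by
  have hbb := pv_catIdx_concat xs (r, a, c) q "backbone"
  have hsc := pv_catIdx_concat xs (r, a, c) q "sidechain"
  by_cases hq : q = r
  · subst hq
    rcases hc with hc | hc <;> subst hc <;>
      simp [pvInner, PySem.Dict.modify, PySem.Dict.insert, PySem.Dict.getD,
        PySem.Dict.get?, PySem.Dict.contains, hbb, hsc]
  · have hne : ¬ ((r, a, c).1 = q ∧ (r, a, c).2.2 = "backbone") ∧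
        ¬ ((r, a, c).1 = q ∧ (r, a, c).2.2 = "sidechain") :=
      ⟨fun h => hq h.1.symm, fun h => hq h.1.symm⟩
    simp [pvInner, hq, hbb, hsc, hne.1, hne.2]

theorem pv_step (xs : List (Int × Int × String)) (x : Int × Int × String)
    (hc : x.2.2 = "backbone" ∨ x.2.2 = "sidechain") :
    pvStepA (pvState xs) x = pvState (xs ++ [x]) := by
  obtain ⟨r, a, c⟩ := x
  simp only at hc
  simp only [pvState, pvStepA]
  set u := PySem.List.dedup (xs.map (fun t => t.1)) with hu
  have hnod : u.Nodup := PySem.Set.nodup_ofList _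
  have hmu : r ∈ u ↔ r ∈ xs.map (fun t => t.1) := PySem.Set.mem_ofList _ _
  have hmapfst : (xs ++ [(r, a, c)]).map (fun t => t.1) = xs.map (fun t => t.1) ++ [r] := by
    simp
  have hded : PySem.List.dedup ((xs ++ [(r, a, c)]).map (fun t => t.1))
      = PySem.Set.add u r := by
    rw [hmapfst, hu, PySem.List.dedup, PySem.List.dedup, PySem.Set.ofList_eq_foldl,
      PySem.Set.ofList_eq_foldl, List.foldl_append]
    rfl
  have hlen : (((xs ++ [(r, a, c)]).length : Nat) : Int) = (xs.length : Int) + 1 := by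
    simp
  by_cases hm : r ∈ u
  · -- known residue: mapping and residue list unchanged
    have hded1 : PySem.List.dedup ((xs ++ [(r, a, c)]).map (fun t => t.1)) = u := by
      rw [hded, PySem.Set.add, if_pos (by simpa [PySem.Set.contains] using hm)]
    rw [pv_contains_mapping u r 0]
    rw [if_pos (by simpa using hm)]
    rw [pv_getD_mapping u r hm hnod 0]
    rw [pv_modify_enum u r hm hnod (fun q => pvInner xs q)
      (fun inner => inner.modify c [] (fun l => l ++ [(xs.length : Int)])) 0]
    rw [hded1, hlen]
    refine Prod.ext ?_ rfl
    simp only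
    congr 1
    apply List.map_congr_left
    intro p _
    have := pv_inner_update xs r a c hc p.2
    rw [← this]
  · -- fresh residue: it is appended at the end
    have hnm : r ∉ xs.map (fun t => t.1) := fun h => hm (hmu.mpr h)
    have hded2 : PySem.List.dedup ((xs ++ [(r, a, c)]).map (fun t => t.1)) = u ++ [r] := by
      rw [hded, PySem.Set.add, if_neg (by simpa [PySem.Set.contains] using hm)]
    have hnod2 : (u ++ [r]).Nodup := by
      simp [List.nodup_append, hnod]
      exact fun b hb e => hm (e ▸ hb)
    have hm2 : r ∈ u ++ [r] := by simp
    rw [pv_contains_mapping u r 0]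
    rw [if_neg (by simpa using hm)]
    -- the freshly inserted inner dict is pvInner xs r
    have hfresh : PySem.Dict.ofList [("backbone", ([] : List Int)), ("sidechain", [])]
        = pvInner xs r := by
      have h1 := pv_catIdx_fresh xs r hnm "backbone"
      have h2 := pv_catIdx_fresh xs r hnm "sidechain"
      simp only [pvInner, h1, h2]
      decide
    -- the updated new_dict is the enum-map over u ++ [r]
    have hdict : (PySem.Dict.mk ((PySem.List.enumerate u 0).map
          (fun p => (p.1, pvInner xs p.2)))).insert (u.length : Int)
          (PySem.Dict.ofList [("backbone", ([] : List Int)), ("sidechain", [])])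
        = PySem.Dict.mk ((PySem.List.enumerate (u ++ [r]) 0).map
          (fun p => (p.1, pvInner xs p.2))) := by
      have hcon : ((PySem.List.enumerate u 0).map
          (fun p => (p.1, pvInner xs p.2))).any (fun q => q.1 == (u.length : Int)) = false := by
        apply List.any_eq_false.mpr
        intro q hq
        obtain ⟨p, hp, rfl⟩ := List.mem_map.mp hq
        have := pv_enum_key_lb u 0 p hp
        have hub : p.1 < 0 + (u.length : Int) := pv_enum_key_ub u 0 p hp
        simp only [beq_iff_eq]
        omega
      simp only [PySem.Dict.insert, PySem.Dict.contains]
      rw [hcon]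
      simp only [Bool.false_eq_true, if_false]
      congr 1
      rw [pv_enum_concat u r 0, List.map_append]
      simp [hfresh]
    -- the updated res_mapping is the enum-map over u ++ [r]
    have hmapd : (PySem.Dict.mk ((PySem.List.enumerate u 0).map
          (fun p => (p.2, p.1)))).insert r (u.length : Int)
        = PySem.Dict.mk ((PySem.List.enumerate (u ++ [r]) 0).map (fun p => (p.2, p.1))) := by
      simp only [PySem.Dict.insert, PySem.Dict.contains]
      have : ((PySem.List.enumerate u 0).map (fun p => (p.2, p.1))).any
          (fun p => p.1 == r) = false := by
        rw [show (((PySem.List.enumerate u 0).map (fun p => (p.2, p.1))).any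
            (fun p => p.1 == r)) = (PySem.Dict.mk ((PySem.List.enumerate u 0).map
            (fun p => (p.2, p.1)))).contains r from rfl, pv_contains_mapping u r 0]
        simpa using hm
      rw [this]
      simp only [Bool.false_eq_true, if_false]
      congr 1
      rw [pv_enum_concat u r 0, List.map_append]
      simp
    rw [hdict, hmapd]
    have hidx2 : (((u ++ [r]).idxOf r : Nat) : Int) = (u.length : Int) := by
      rw [pv_idxOf_append u r hm]
    rw [show (u.length : Int) = 0 + (((u ++ [r]).idxOf r : Nat) : Int) by rw [hidx2]; ring]
    rw [pv_getD_mapping (u ++ [r]) r hm2 hnod2 0]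
    rw [pv_modify_enum (u ++ [r]) r hm2 hnod2 (fun q => pvInner xs q)
      (fun inner => inner.modify c [] (fun l => l ++ [(xs.length : Int)])) 0]
    rw [hded2, hlen]
    have hlen2 : (((u ++ [r]).length : Nat) : Int) = (u.length : Int) + 1 := by
      simp
    rw [hlen2, hidx2]
    simp only [zero_add]
    refine Prod.ext ?_ rfl
    simp only
    congr 1
    apply List.map_congr_left
    intro p _
    have := pv_inner_update xs r a c hc p.2
    rw [← this]

theorem pv_invariant (xs : List (Int × Int × String))
    (h : ∀ t ∈ xs, t.2.2 = "backbone" ∨ t.2.2 = "sidechain") :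
    xs.foldl pvStepA (PySem.Dict.empty, PySem.Dict.empty, 0, 0) = pvState xs := by
  induction xs using List.reverseRecOn with
  | nil => simp [pvState, PySem.List.dedup, PySem.Set.ofList, PySem.Dict.empty]
  | append_singleton ys y ih =>
      rw [List.foldl_append, ih (fun t ht => h t (by simp [ht]))]
      simp only [List.foldl_cons, List.foldl_nil]
      exact pv_step ys y (h y (by simp))

theorem pv_enum_fst_nodup {α : Type} (l : List α) :
    ∀ s : Int, ((PySem.List.enumerate l s).map (fun p => p.1)).Nodup := by
  induction l with
  | nil => intro s; simp [PySem.List.enumerate]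
  | cons a t ih =>
      intro s
      simp only [PySem.List.enumerate, List.map_cons, List.nodup_cons]
      refine ⟨?_, ih (s + 1)⟩
      intro hmem
      obtain ⟨p, hp, he⟩ := List.mem_map.mp hmem
      have := pv_enum_key_lb t (s + 1) p hp
      omega

theorem pv_foldl_insert_fresh {κ ν : Type} [BEq κ] [LawfulBEq κ] :
    ∀ (ps d : List (κ × ν)),
      (ps.map (fun p => p.1)).Nodup →
      (∀ k ∈ ps.map (fun p => p.1), ∀ q ∈ d, ¬ q.1 = k) →
      ps.foldl (fun acc q => acc.insert q.1 q.2) (PySem.Dict.mk d) = PySem.Dict.mk (d ++ ps) := by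
  intro ps
  induction ps with
  | nil => intro d _ _; simp
  | cons p t ih =>
      intro d hnod hfresh
      have hcon : (PySem.Dict.mk d).contains p.1 = false := by
        simp only [PySem.Dict.contains]
        apply List.any_eq_false.mpr
        intro q hq
        simpa using hfresh p.1 (by simp) q hq
      have hins : (PySem.Dict.mk d).insert p.1 p.2 = PySem.Dict.mk (d ++ [p]) := by
        simp only [PySem.Dict.insert, hcon]
        simp
      have hfresh2 : ∀ k ∈ t.map (fun p => p.1), ∀ q ∈ d ++ [p], ¬ q.1 = k := by
        intro k hk q hq
        rcases List.mem_append.mp hq with hq | hq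
        · exact hfresh k (by simp [hk]) q hq
        · have : q = p := by simpa using hq
          subst this
          exact fun e => (List.nodup_cons.mp (by simpa using hnod)).1 (e ▸ hk)
      rw [List.foldl_cons, hins, ih (d ++ [p]) (by simpa using hnod.of_cons) hfresh2,
        List.append_assoc]
      rfl

theorem pv_ofList_nodup {κ ν : Type} [BEq κ] [LawfulBEq κ] (ps : List (κ × ν))
    (hnod : (ps.map (fun p => p.1)).Nodup) :
    PySem.Dict.ofList ps = PySem.Dict.mk ps := by
  have := pv_foldl_insert_fresh ps [] hnod (by simp)
  simpa [PySem.Dict.ofList, PySem.Dict.update, PySem.Dict.empty] using this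

-- the per-category column B's first pass builds: positions of category cat, tagged with residue id
def pvCol (xs : List (Int × Int × String)) (cat : String) : List (Int × Int) :=
  ((PySem.List.enumerate xs).filter (fun p => p.2.2.2 == cat)).map (fun p => (p.2.1, p.1))

theorem pv_col_concat (xs : List (Int × Int × String)) (x : Int × Int × String) (cat : String) :
    pvCol (xs ++ [x]) cat
      = pvCol xs cat ++ (if x.2.2 = cat then [(x.1, (xs.length : Int))] else []) := by
  simp only [pvCol, pv_enum_concat xs x 0, List.filter_append, List.map_append]
  congr 1
  by_cases h : x.2.2 = cat <;> simp [h]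

-- B's first pass produces exactly the two columns
theorem pv_cols_invariant (xs : List (Int × Int × String))
    (h : ∀ t ∈ xs, t.2.2 = "backbone" ∨ t.2.2 = "sidechain") :
    (PySem.List.enumerate xs).foldl
        (fun d p => d.modify p.2.2.2 [] (fun l => l ++ [(p.2.1, p.1)]))
        (PySem.Dict.ofList [("backbone", []), ("sidechain", [])])
      = PySem.Dict.mk [("backbone", pvCol xs "backbone"), ("sidechain", pvCol xs "sidechain")] := by
  induction xs using List.reverseRecOn with
  | nil => decide
  | append_singleton ys y ih =>
      rw [pv_enum_concat ys y 0, List.foldl_append,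
        ih (fun t ht => h t (by simp [ht]))]
      obtain ⟨r, a, c⟩ := y
      have hb := pv_col_concat ys (r, a, c) "backbone"
      have hs := pv_col_concat ys (r, a, c) "sidechain"
      have hc : c = "backbone" ∨ c = "sidechain" := by simpa using h (r, a, c) (by simp)
      rcases hc with hc | hc <;> subst hc <;>
        simp [PySem.Dict.modify, PySem.Dict.getD, PySem.Dict.get?, PySem.Dict.insert,
          PySem.Dict.contains, hb, hs]

-- filtering a column per residue gives that residue's category list
theorem pv_col_filter (xs : List (Int × Int × String)) (rid : Int) (cat : String) :
    ((pvCol xs cat).filter (fun q => q.1 == rid)).map (fun q => q.2)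
      = pvCatIdx xs rid cat := by
  simp only [pvCol, pvCatIdx, List.filter_map, List.map_map, List.filter_filter]
  congr 1

-- ===== VERDICT (by name: the statement is the Claim_ definition above) =====
theorem renumber_atoms_and_residues_spec : Claim_equal_renumber_atoms_and_residues := by
  intro atoms _hdom hpre
  unfold Spec_renumber_atoms_and_residues
  unfold renumber_atoms_and_residues renumber_atoms_and_residues_alt
  rw [pv_invariant atoms hpre, pv_cols_invariant atoms hpre]
  set u := PySem.List.dedup (atoms.map (fun t => t.1)) with hu
  have hinner : ((PySem.List.enumerate u).map (fun p =>
      (p.1, PySem.Dict.ofList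
        ((PySem.Dict.mk [("backbone", pvCol atoms "backbone"),
                         ("sidechain", pvCol atoms "sidechain")]).keys.map (fun cat =>
          (cat, (((PySem.Dict.mk [("backbone", pvCol atoms "backbone"),
                                  ("sidechain", pvCol atoms "sidechain")]).getD cat []).filter
                    (fun q => q.1 == p.2)).map (fun q => q.2)))))))
      = (PySem.List.enumerate u).map (fun p => (p.1, pvInner atoms p.2)) := by
    apply List.map_congr_left
    intro p _
    have hkeys : (PySem.Dict.mk [("backbone", pvCol atoms "backbone"),
        ("sidechain", pvCol atoms "sidechain")]).keys = ["backbone", "sidechain"] := rfl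
    rw [hkeys]
    have hgb : (PySem.Dict.mk [("backbone", pvCol atoms "backbone"),
        ("sidechain", pvCol atoms "sidechain")]).getD "backbone" [] = pvCol atoms "backbone" := by
      simp [PySem.Dict.getD, PySem.Dict.get?]
    have hgs : (PySem.Dict.mk [("backbone", pvCol atoms "backbone"),
        ("sidechain", pvCol atoms "sidechain")]).getD "sidechain" [] = pvCol atoms "sidechain" := by
      simp [PySem.Dict.getD, PySem.Dict.get?]
    simp only [List.map_cons, List.map_nil, hgb, hgs,
      pv_col_filter atoms p.2 "backbone", pv_col_filter atoms p.2 "sidechain"]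
    rw [pv_ofList_nodup _ (by simp)]
    rfl
  dsimp only
  rw [hinner, pv_ofList_nodup _ (by rw [List.map_map]; exact pv_enum_fst_nodup u 0)]
  rfl
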